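-- pv_equiv track=rewrite | github.com/AnikaitLakhotia/SMT-SAT-GoL | SAT_GoL.py | get_kth_element
-- ===== SOURCE A (Python) =====
-- def get_kth_element(k, c, n, m):
--     """
--     Find the kth element(when matrix is flattened) of a nxm matrix in it's previous generation.
--
--     Args:
--         k (int): Element number when matrix is flattened.
--         c (int): Current generation.
--         n, m (int): Matrix Dimensions.
--
--     Returns:
--         int: kth element.
--
--     """
--     # Create a matrix with elements in the format "c{i+1}_{j+1}_{c-1}"
--     matrix = []
--     for i in range(n):
--         row = []
--         for j in range(m):
--             element = f"c{i+1}_{j+1}_{c-1}"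
--             row.append(element)
--         matrix.append(row)
--     # Flatten the matrix into a single list
--     flattened_matrix = [element for row in matrix for element in row]
--
--     # Check if k is a valid index
--     if k < 1 or k > len(flattened_matrix):
--         return "Invalid index"
--
--     # Return the k-th element (index k-1) from the flattened matrix
--     return flattened_matrix[k-1]
-- ===== SOURCE B (Python) =====
-- def get_kth_element(k, c, n, m):
--     if k < 1 or n < 1 or m < 1 or k > n * m:
--         return "Invalid index"
--     i, j = divmod(k - 1, m)
--     return f"c{i+1}_{j+1}_{c-1}"
-- ===== Notes on version B (the rewrite author's own statement) =====
-- stated objective: faster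
-- what changed: B replaces building the whole n*m label matrix and flattening it by O(1) index arithmetic: i=(k-1)//m, j=(k-1)%m, then formats the single label.
import Mathlib
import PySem

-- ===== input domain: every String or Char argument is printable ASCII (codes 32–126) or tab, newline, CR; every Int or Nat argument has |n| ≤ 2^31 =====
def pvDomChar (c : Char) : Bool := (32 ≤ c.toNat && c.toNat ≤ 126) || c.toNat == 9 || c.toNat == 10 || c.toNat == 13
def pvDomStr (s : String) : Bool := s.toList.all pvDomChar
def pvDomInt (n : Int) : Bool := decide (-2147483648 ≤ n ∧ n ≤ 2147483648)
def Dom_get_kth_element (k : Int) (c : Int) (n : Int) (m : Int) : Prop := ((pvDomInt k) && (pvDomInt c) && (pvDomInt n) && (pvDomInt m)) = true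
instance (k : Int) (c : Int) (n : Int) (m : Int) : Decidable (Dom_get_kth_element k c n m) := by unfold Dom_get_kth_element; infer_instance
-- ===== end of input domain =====

-- B replaces A's construction of the whole n×m label matrix by O(1) index
-- arithmetic: i = (k-1)//m, j = (k-1)%m (objective: faster).

-- the f-string "c{i+1}_{j+1}_{c-1}" (shared formatting helper of both programs)
def pvFmt (c : Int) (i : Int) (j : Int) : String :=
  "c" ++ PySem.Int.toStr (i + 1) ++ "_" ++ PySem.Int.toStr (j + 1) ++ "_" ++ PySem.Int.toStr (c - 1)

-- ===== PORT A =====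
def get_kth_element (k : Int) (c : Int) (n : Int) (m : Int) : String :=
  let matrix : List (List String) :=
    (PySem.List.pyRange 0 n 1).foldl (fun mat i =>
      mat ++ [(PySem.List.pyRange 0 m 1).foldl (fun row j => row ++ [pvFmt c i j]) []]) []
  let flattened := matrix.flatMap (fun row => row)
  if k < 1 ∨ k > (flattened.length : Int) then "Invalid index"
  -- flattened_matrix[k-1]: the guard guarantees 1 ≤ k ≤ len, so the index is in range
  else PySem.List.pyGetD flattened (k - 1) ""

-- ===== PORT B =====
def get_kth_element_alt (k : Int) (c : Int) (n : Int) (m : Int) : String :=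
  if k < 1 ∨ n < 1 ∨ m < 1 ∨ k > n * m then "Invalid index"
  else pvFmt c (PySem.Int.floordiv (k - 1) m) (PySem.Int.mod (k - 1) m)

-- ===== PRECONDITION & SPEC =====
def Spec_get_kth_element (k : Int) (c : Int) (n : Int) (m : Int) (out : String) : Prop := out = get_kth_element_alt k c n m
instance (k : Int) (c : Int) (n : Int) (m : Int) (out : String) : Decidable (Spec_get_kth_element k c n m out) := by unfold Spec_get_kth_element; infer_instance

-- ===== CLAIM (what is proved, stated in full; the proofs are below) =====
def Claim_equal_get_kth_element : Prop := ∀ (k : Int) (c : Int) (n : Int) (m : Int), Dom_get_kth_element k c n m → Spec_get_kth_element k c n m (get_kth_element k c n m)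

-- ===== LEMMAS AND PROOFS =====

-- A's loops reduced to a flatMap-of-map comprehension
theorem pvA_eq_flat (k c n m : Int) :
    get_kth_element k c n m =
      (let fl := (PySem.List.pyRange 0 n 1).flatMap
          (fun i => (PySem.List.pyRange 0 m 1).map (fun j => pvFmt c i j));
       if k < 1 ∨ k > (fl.length : Int) then "Invalid index"
       else PySem.List.pyGetD fl (k - 1) "") := by
  simp only [get_kth_element, PySem.List.foldl_append_singleton_eq_map, List.nil_append,
    List.flatMap_map]

theorem pv_fd_mod {q r m : Int} (hm : 0 < m) (h0 : 0 ≤ r) (h : r < m) :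
    PySem.Int.floordiv (q * m + r) m = q ∧ PySem.Int.mod (q * m + r) m = r := by
  have hfd : PySem.Int.floordiv (q * m + r) m = q := by
    rw [PySem.Int.floordiv_eq_iff_of_pos hm]
    constructor
    · linarith
    · nlinarith
  refine ⟨hfd, ?_⟩
  have := PySem.Int.floordiv_mul_add_mod (q * m + r) m
  rw [hfd] at this
  linarith

theorem pv_flat_eq_range (c m : Int) (hm : 0 < m) (N : Nat) :
    (PySem.List.pyRange 0 (N : Int) 1).flatMap
        (fun i => (PySem.List.pyRange 0 m 1).map (fun j => pvFmt c i j))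
      = (PySem.List.pyRange 0 ((N : Int) * m) 1).map
          (fun t => pvFmt c (PySem.Int.floordiv t m) (PySem.Int.mod t m)) := by
  induction N with
  | zero => simp [PySem.List.pyRange_one_eq_nil]
  | succ N ih =>
    have h1 : ((N + 1 : Nat) : Int) = (N : Int) + 1 := by push_cast; ring
    have hNm : (0 : Int) ≤ (N : Int) * m := by positivity
    have hsplit : PySem.List.pyRange 0 (((N : Int) + 1) * m) 1
        = PySem.List.pyRange 0 ((N : Int) * m) 1 ++
          PySem.List.pyRange ((N : Int) * m) (((N : Int) + 1) * m) 1 :=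
      PySem.List.pyRange_one_append 0 ((N : Int) * m) (((N : Int) + 1) * m) hNm (by nlinarith)
    rw [h1, PySem.List.pyRange_one_succ_right (by positivity), hsplit,
      List.flatMap_append, List.map_append, ih]
    congr 1
    simp only [List.flatMap_cons, List.flatMap_nil, List.append_nil]
    rw [PySem.List.pyRange_one ((N : Int) * m), PySem.List.pyRange_one 0 m, List.map_map,
      List.map_map]
    have hlen : (((N : Int) + 1) * m - (N : Int) * m).toNat = (m - 0).toNat := by
      congr 1; ring
    rw [hlen]
    apply List.map_congr_left
    intro r hr
    simp only [List.mem_range] at hr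
    have hrm : (r : Int) < m := by
      have : (r : Int) < ((m - 0).toNat : Int) := by exact_mod_cast hr
      omega
    obtain ⟨hfd, hmod⟩ := pv_fd_mod (q := (N : Int)) (r := (r : Int)) hm (by positivity) hrm
    simp only [Function.comp_apply, hfd, hmod, zero_add]

theorem get_kth_element_spec : Claim_equal_get_kth_element := by
  unfold Claim_equal_get_kth_element Spec_get_kth_element
  intro k c n m _
  rw [pvA_eq_flat]
  by_cases hpos : 1 ≤ n ∧ 1 ≤ m
  · obtain ⟨hn, hm⟩ := hpos
    have hN : ((n.toNat : Int)) = n := by omega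
    have hflat := pv_flat_eq_range c m (by omega) n.toNat
    rw [hN] at hflat
    simp only [hflat, get_kth_element_alt]
    have hlen : (((PySem.List.pyRange 0 (n * m) 1).map
        (fun t => pvFmt c (PySem.Int.floordiv t m) (PySem.Int.mod t m))).length : Int)
        = n * m := by
      rw [List.length_map, PySem.List.length_pyRange_one]
      have : (0 : Int) < n * m := by positivity
      omega
    rw [hlen]
    by_cases hv : k < 1 ∨ k > n * m
    · rw [if_pos hv, if_pos (by tauto)]
    · rw [if_neg hv, if_neg (by omega)]
      push Not at hv
      rw [PySem.List.pyGetD_map_pyRange_of_nonneg _ _ _ _ (by omega) (by omega)]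
  · -- n < 1 or m < 1: the matrix is empty, both sides return "Invalid index"
    have hflat : (PySem.List.pyRange 0 n 1).flatMap
        (fun i => (PySem.List.pyRange 0 m 1).map (fun j => pvFmt c i j)) = [] := by
      rcases not_and_or.mp hpos with h | h
      · rw [PySem.List.pyRange_one_eq_nil (show n ≤ 0 by omega)]; rfl
      · simp [PySem.List.pyRange_one_eq_nil (show m ≤ 0 by omega)]
    simp only [hflat, List.length_nil, Int.natCast_zero, get_kth_element_alt]
    rw [if_pos (by omega), if_pos (by omega)]
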